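-- pv_equiv track=rewrite | github.com/lcouedor/song_difficulty | main.py | ecartNotes
-- ===== SOURCE A (Python) =====
-- notes = ['C','C#','D','Eb','E','F','F#','G','G#','A','Bb','B']
--
-- def ecartNote(n1, n2):
--     octaveN1 = n1[len(n1)-1]
--     octaveN2 = n2[len(n2)-1]
--     nbOctaveDif = int(octaveN2) - int(octaveN1)
--     indN1 = notes.index(n1.replace(octaveN1, ""))
--     indN2 = notes.index(n2.replace(octaveN2, ""))
--
--     nbDist = 0
--
--     trouve = False
--
--     #la note 1 est avant la note 2
--     if(nbOctaveDif > 0):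
--         i=indN1
--         while(not(trouve)):
--             if(notes[i] == n2.replace(octaveN2, "")):
--                 trouve=True
--             else:
--                 nbDist+=1
--             i+=1
--             i=i%12
--
--         if(indN1 <= indN2):
--             return nbDist+abs(nbOctaveDif)*12
--         return nbDist+abs(nbOctaveDif-1)*12
--
--     #la note 2 est avant la note 1
--     if(nbOctaveDif < 0):
--         i=indN2
--         nbDist=0
--         while(not(trouve)):
--             if(notes[i] == n1.replace(octaveN1, "")):
--                 trouve=True
--             else:
--                 nbDist+=1
--             i+=1
--             i=i%12
--
--         if(indN2 <= indN1):
--             return nbDist+(abs(nbOctaveDif))*12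
--         return nbDist+abs(nbOctaveDif+1)*12
--
--     #les deux notes ont la même octave
--     if(nbOctaveDif == 0):
--         if(indN1 < indN2): #si la note 1 est avant la note 2 (sans octave)
--             i=indN1
--             while(not(trouve)):
--                 if(notes[i] == n2.replace(octaveN2, "")):
--                     trouve=True
--                 else:
--                     nbDist+=1
--                 i+=1
--
--         if(indN2 < indN1): #si la note 2 est avant la note 1 (sans octave)
--             i=indN2
--             nbDist=0
--             while(not(trouve)):
--                 if(notes[i] == n1.replace(octaveN1, "")):
--                     trouve=True
--                 else:
--                     nbDist+=1
--                 i+=1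
--
--         return nbDist
--
-- def ecartNotes(array):
--     finalTab = []
--     for i in range(len(array)-1):
--         j=i
--         note1 = array[i]
--         note2 = array[i+1]
--
--         if(note2 == ""): #si silence, on a le temps de se déplacer, aucun écart
--             #TODO changer ça ? ou je laisse ?
--             finalTab.append(0)
--         else:
--             if(note1 != ""):
--                 finalTab.append(ecartNote(note1,note2))
--
--     return finalTab
-- ===== SOURCE B (Python) =====
-- notes = ['C','C#','D','Eb','E','F','F#','G','G#','A','Bb','B']
--
-- def ecartNote(n1, n2):
--     o1 = n1[-1]
--     o2 = n2[-1]
--     nbOctaveDif = int(o2) - int(o1)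
--     indN1 = notes.index(n1.replace(o1, ""))
--     indN2 = notes.index(n2.replace(o2, ""))
--     return abs(indN2 - indN1 + 12 * nbOctaveDif)
--
-- def ecartNotes(array):
--     return [0 if n2 == "" else ecartNote(n1, n2)
--             for n1, n2 in zip(array, array[1:])
--             if n2 == "" or n1 != ""]
-- ===== Notes on version B (the rewrite author's own statement) =====
-- stated objective: simpler
-- what changed: ecartNote's three-branch circular while-loop counting is replaced by one closed-form absolute pitch difference abs(indN2 - indN1 + 12*octaveDiff), and the index-based for loop over range(len-1) becomes a comprehension over zip(array, array[1:]); Pre_ excludes inputs on which A raises (a non-empty note whose last character is not a digit, or whose name after stripping that character is not in the notes table).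
import Mathlib
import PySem

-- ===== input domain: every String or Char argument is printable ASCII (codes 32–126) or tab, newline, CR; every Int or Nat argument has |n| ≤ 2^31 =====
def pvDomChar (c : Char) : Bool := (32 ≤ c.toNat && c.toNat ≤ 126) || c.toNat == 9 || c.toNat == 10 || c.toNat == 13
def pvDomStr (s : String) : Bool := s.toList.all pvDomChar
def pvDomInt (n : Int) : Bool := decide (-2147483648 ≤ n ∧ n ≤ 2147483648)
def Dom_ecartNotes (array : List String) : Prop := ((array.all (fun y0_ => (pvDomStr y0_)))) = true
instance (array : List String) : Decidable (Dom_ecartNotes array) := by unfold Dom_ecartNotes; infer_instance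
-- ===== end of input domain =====

-- B replaces ecartNote's three-branch circular while-loop counting by the closed-form
-- |indN2 - indN1 + 12*octaveDiff| and the indexed for-loop by a comprehension over
-- zip(array, array[1:]) (objective: simpler).

-- ===== PORT A =====
def pvNotes : List String := ["C","C#","D","Eb","E","F","F#","G","G#","A","Bb","B"]

-- A's circular while loop (i = (i+1) % 12); the fuel of 12 only makes it total:
-- whenever the target is in pvNotes (guaranteed where A returns) it is hit within 12 steps.
def pvScanMod : Nat → Nat → String → Int → Option Int
  | 0, _, _, _ => none
  | fuel+1, i, t, acc =>
    match PySem.List.pyGet? pvNotes (i : Int) with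
    | none => none
    | some s => if s = t then some acc else pvScanMod fuel ((i+1) % 12) t (acc+1)

-- A's linear while loop in the equal-octave branch (no modulo; running past the
-- table would be Python's IndexError = none; fuel 12 again only for totality).
def pvScanLin : Nat → Nat → String → Int → Option Int
  | 0, _, _, _ => none
  | fuel+1, i, t, acc =>
    match PySem.List.pyGet? pvNotes (i : Int) with
    | none => none
    | some s => if s = t then some acc else pvScanLin fuel (i+1) t (acc+1)

def ecartNoteA (n1 n2 : String) : Option Int :=
  match PySem.Str.pyGet? n1 (PySem.Str.len n1 - 1) with
  | none => none
  | some o1 =>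
  match PySem.Str.pyGet? n2 (PySem.Str.len n2 - 1) with
  | none => none
  | some o2 =>
  match PySem.Int.ofStr? (String.ofList [o2]), PySem.Int.ofStr? (String.ofList [o1]) with
  | some v2, some v1 =>
    let d := v2 - v1
    let s1 := PySem.Str.replace n1 (String.ofList [o1]) ""
    let s2 := PySem.Str.replace n2 (String.ofList [o2]) ""
    match PySem.List.index? pvNotes s1, PySem.List.index? pvNotes s2 with
    | some i1, some i2 =>
      if 0 < d then
        match pvScanMod 12 i1 s2 0 with
        | none => none
        | some nb => if i1 ≤ i2 then some (nb + |d| * 12) else some (nb + |d - 1| * 12)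
      else if d < 0 then
        match pvScanMod 12 i2 s1 0 with
        | none => none
        | some nb => if i2 ≤ i1 then some (nb + |d| * 12) else some (nb + |d + 1| * 12)
      else
        if i1 < i2 then pvScanLin 12 i1 s2 0
        else if i2 < i1 then pvScanLin 12 i2 s1 0
        else some 0
    | _, _ => none
  | _, _ => none

def ecartNotes (array : List String) : List Int :=
  ((List.range (array.length - 1)).foldl
    (fun acc i =>
      match acc with
      | none => none
      | some l =>
        match PySem.List.pyGet? array (i : Int), PySem.List.pyGet? array ((i : Int) + 1) with
        | some n1, some n2 =>
          if n2 = "" then some (l ++ [(0 : Int)])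
          else if n1 ≠ "" then
            match ecartNoteA n1 n2 with
            | some v => some (l ++ [v])
            | none => none
          else some l
        | _, _ => none)
    (some [])).getD []

-- ===== PORT B =====
def ecartNoteB (n1 n2 : String) : Option Int :=
  match PySem.Str.pyGet? n1 (-1) with
  | none => none
  | some o1 =>
  match PySem.Str.pyGet? n2 (-1) with
  | none => none
  | some o2 =>
  match PySem.Int.ofStr? (String.ofList [o2]), PySem.Int.ofStr? (String.ofList [o1]) with
  | some v2, some v1 =>
    let d := v2 - v1
    match PySem.List.index? pvNotes (PySem.Str.replace n1 (String.ofList [o1]) ""),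
          PySem.List.index? pvNotes (PySem.Str.replace n2 (String.ofList [o2]) "") with
    | some i1, some i2 => some |(i2 : Int) - (i1 : Int) + 12 * d|
    | _, _ => none
  | _, _ => none

def ecartNotes_alt (array : List String) : List Int :=
  (((array.zip (PySem.List.slice array (some 1) none)).filter
      (fun p => p.2 == "" || p.1 != "")).mapM
    (fun p => if p.2 = "" then some (0 : Int) else ecartNoteB p.1 p.2)).getD []

-- ===== PRECONDITION & SPEC =====
-- A note survives ecartNote iff its last character is a decimal digit and the name
-- obtained by deleting that character is in the notes table (else Python raises ValueError).
def pvOkNote (n : String) : Bool :=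
  match n.toList.getLast? with
  | none => true
  | some c => c.isDigit && pvNotes.contains (PySem.Str.replace n (String.ofList [c]) "")

-- Pre_ excludes exactly the inputs on which A raises ValueError: an adjacent pair actually
-- passed to ecartNote (note2 ≠ "" and note1 ≠ "") whose notes are malformed in the above sense.
def Pre_ecartNotes (array : List String) : Prop :=
  ∀ p ∈ array.zip (array.drop 1), p.2 ≠ "" → p.1 ≠ "" → pvOkNote p.1 = true ∧ pvOkNote p.2 = true
instance (array : List String) : Decidable (Pre_ecartNotes array) := by
  unfold Pre_ecartNotes; infer_instance

def pvWitness_ecartNotes : List String := ["C4", "", "A5", "Bb2"]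

def Spec_ecartNotes (array : List String) (out : List Int) : Prop := out = ecartNotes_alt array
instance (array : List String) (out : List Int) : Decidable (Spec_ecartNotes array out) := by
  unfold Spec_ecartNotes; infer_instance

-- ===== CLAIM (what is proved, stated in full; the proofs are below) =====
def Claim_equal_ecartNotes : Prop := ∀ (array : List String), Dom_ecartNotes array → Pre_ecartNotes array → Spec_ecartNotes array (ecartNotes array)

-- ===== LEMMAS AND PROOFS =====

theorem pvScanMod_eval : ∀ a b : Fin 12,
    pvScanMod 12 a.val (pvNotes[b.val]!) 0 =
      some (if a.val ≤ b.val then (b.val : Int) - a.val else (b.val : Int) - a.val + 12) := by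
  decide

theorem pvScanLin_eval : ∀ a b : Fin 12, a.val < b.val →
    pvScanLin 12 a.val (pvNotes[b.val]!) 0 = some ((b.val : Int) - a.val) := by
  decide

-- n[len(n)-1] and n[-1] are the same Python access (both the last character, both raising on "").
theorem pyGet_last (n : String) :
    PySem.Str.pyGet? n (PySem.Str.len n - 1) = PySem.Str.pyGet? n (-1) := by
  simp only [PySem.Str.pyGet?_eq, PySem.Str.len_eq, PySem.Chars.pyGet?_eq_listPyGet?]
  rcases List.eq_nil_or_concat n.toList with h | ⟨ys, y, h⟩ <;> rw [h]
  · rfl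
  · rw [List.concat_eq_append, PySem.List.pyGet?_neg_one_append_singleton]
    have h2 : ((ys ++ [y]).length : Int) - 1 = (ys.length : Nat) := by simp
    rw [h2, PySem.List.pyGet?_natCast]
    simp

theorem ecartNote_eq (n1 n2 : String) : ecartNoteA n1 n2 = ecartNoteB n1 n2 := by
  unfold ecartNoteA ecartNoteB
  rw [pyGet_last n1, pyGet_last n2]
  cases h1 : PySem.Str.pyGet? n1 (-1) with
  | none => rfl
  | some o1 => ?_
  dsimp only
  cases h2 : PySem.Str.pyGet? n2 (-1) with
  | none => rfl
  | some o2 => ?_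
  dsimp only
  cases hv2 : PySem.Int.ofStr? (String.ofList [o2]) with
  | none => rfl
  | some v2 => ?_
  cases hv1 : PySem.Int.ofStr? (String.ofList [o1]) with
  | none => rfl
  | some v1 => ?_
  dsimp only
  cases hi1 : PySem.List.index? pvNotes (PySem.Str.replace n1 (String.ofList [o1]) "") with
  | none => rfl
  | some i1 => ?_
  cases hi2 : PySem.List.index? pvNotes (PySem.Str.replace n2 (String.ofList [o2]) "") with
  | none => rfl
  | some i2 => ?_
  dsimp only
  obtain ⟨hk1, he1, -⟩ := PySem.List.getElem_of_index?_eq_some hi1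
  obtain ⟨hk2, he2, -⟩ := PySem.List.getElem_of_index?_eq_some hi2
  have h12 : pvNotes.length = 12 := rfl
  have hb1 : i1 < 12 := h12 ▸ hk1
  have hb2 : i2 < 12 := h12 ▸ hk2
  have hs1 : PySem.Str.replace n1 (String.ofList [o1]) "" = pvNotes[i1]! := by
    rw [getElem!_pos pvNotes i1 hk1, he1]
  have hs2 : PySem.Str.replace n2 (String.ofList [o2]) "" = pvNotes[i2]! := by
    rw [getElem!_pos pvNotes i2 hk2, he2]
  rw [hs1, hs2]
  have hM1 := pvScanMod_eval ⟨i1, hb1⟩ ⟨i2, hb2⟩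
  have hM2 := pvScanMod_eval ⟨i2, hb2⟩ ⟨i1, hb1⟩
  simp only at hM1 hM2
  by_cases hd : 0 < v2 - v1
  · rw [if_pos hd, hM1]
    have habs : |(i2 : Int) - (i1 : Int) + 12 * (v2 - v1)| = (i2 : Int) - i1 + 12 * (v2 - v1) :=
      abs_of_nonneg (by omega)
    rw [habs, abs_of_pos hd, abs_of_nonneg (a := v2 - v1 - 1) (by omega)]
    split_ifs <;> simp only [Option.some.injEq] <;> omega
  · rw [if_neg hd]
    by_cases hd' : v2 - v1 < 0
    · rw [if_pos hd', hM2]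
      have habs : |(i2 : Int) - (i1 : Int) + 12 * (v2 - v1)| = -((i2 : Int) - i1 + 12 * (v2 - v1)) :=
        abs_of_nonpos (by omega)
      rw [habs, abs_of_neg hd', abs_of_nonpos (a := v2 - v1 + 1) (by omega)]
      split_ifs <;> simp only [Option.some.injEq] <;> omega
    · rw [if_neg hd']
      have hdz : v2 - v1 = 0 := by omega
      by_cases hlt : i1 < i2
      · rw [if_pos hlt, pvScanLin_eval ⟨i1, hb1⟩ ⟨i2, hb2⟩ hlt]
        simp only [Option.some.injEq, hdz]
        rw [abs_of_nonneg (by omega : (0:Int) ≤ (i2 : Int) - i1 + 12 * 0)]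
        omega
      · rw [if_neg hlt]
        by_cases hlt' : i2 < i1
        · rw [if_pos hlt', pvScanLin_eval ⟨i2, hb2⟩ ⟨i1, hb1⟩ hlt']
          simp only [Option.some.injEq, hdz]
          rw [abs_of_nonpos (by omega : (i2 : Int) - i1 + 12 * 0 ≤ 0)]
          omega
        · rw [if_neg hlt']
          simp only [Option.some.injEq, hdz]
          have : i1 = i2 := by omega
          subst this
          simp

-- the loop-body step function both traversals reduce to
def pvStep (acc : Option (List Int)) (p : String × String) : Option (List Int) :=
  match acc with
  | none => none
  | some l =>
    if p.2 = "" then some (l ++ [(0 : Int)])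
    else if p.1 ≠ "" then
      match ecartNoteA p.1 p.2 with
      | some v => some (l ++ [v])
      | none => none
    else some l

theorem pvStep_none (ps : List (String × String)) : ps.foldl pvStep none = none := by
  induction ps with
  | nil => rfl
  | cons p ps ih => simpa [pvStep] using ih

theorem foldl_pvStep_eq (ps : List (String × String)) : ∀ l : List Int,
    ps.foldl pvStep (some l) =
      ((ps.filter (fun p => p.2 == "" || p.1 != "")).mapM
        (fun p => if p.2 = "" then some (0 : Int) else ecartNoteB p.1 p.2)).map (l ++ ·) := by
  induction ps with
  | nil => intro l; simp
  | cons p ps ih =>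
    intro l
    by_cases h2 : p.2 = ""
    · have hstep : pvStep (some l) p = some (l ++ [(0 : Int)]) := by simp [pvStep, h2]
      simp only [List.foldl_cons, hstep, List.filter_cons, h2, ih (l ++ [0])]
      cases hm : (ps.filter (fun p => p.2 == "" || p.1 != "")).mapM
          (fun p => if p.2 = "" then some (0 : Int) else ecartNoteB p.1 p.2) <;>
        simp [hm, h2]
    · by_cases h1 : p.1 = ""
      · have hstep : pvStep (some l) p = some l := by simp [pvStep, h2, h1]
        have hfil : (p.2 == "" || p.1 != "") = false := by simp [h2, h1]
        simp only [List.foldl_cons, hstep, List.filter_cons, hfil]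
        exact ih l
      · have hfil : (p.2 == "" || p.1 != "") = true := by simp [h1]
        simp only [List.foldl_cons, List.filter_cons, hfil, if_pos]
        cases hB : ecartNoteB p.1 p.2 with
        | none =>
          have hstep : pvStep (some l) p = none := by
            simp [pvStep, h2, h1, ecartNote_eq, hB]
          simp [hstep, pvStep_none, hB, h2]
        | some v =>
          have hstep : pvStep (some l) p = some (l ++ [v]) := by
            simp [pvStep, h2, h1, ecartNote_eq, hB]
          simp only [hstep, ih (l ++ [v])]
          cases hm : (ps.filter (fun p => p.2 == "" || p.1 != "")).mapM
              (fun p => if p.2 = "" then some (0 : Int) else ecartNoteB p.1 p.2) <;>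
            simp [hm, h2, hB]

theorem range_pairs (array : List String) :
    (List.range (array.length - 1)).map
        (fun i => (array.getD i "", array.getD (i+1) "")) =
      array.zip (array.drop 1) := by
  apply List.ext_getElem
  · simp [List.length_zip]
  · intro i h1 h2
    have hi : i < array.length - 1 := by simpa using h1
    simp [List.getElem_zip]
    constructor <;> rw [List.getElem?_eq_getElem (by omega)] <;> rfl

-- ===== VERDICT (by name: the statement is the Claim_ definition above) =====
theorem ecartNotes_spec : Claim_equal_ecartNotes := by
  unfold Claim_equal_ecartNotes
  intro array _ _
  unfold Spec_ecartNotes ecartNotes ecartNotes_alt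
  rw [PySem.List.slice_from_one, ← List.drop_one]
  have hbody : (List.range (array.length - 1)).foldl
      (fun acc i =>
        match acc with
        | none => none
        | some l =>
          match PySem.List.pyGet? array (i : Int), PySem.List.pyGet? array ((i : Int) + 1) with
          | some n1, some n2 =>
            if n2 = "" then some (l ++ [(0 : Int)])
            else if n1 ≠ "" then
              match ecartNoteA n1 n2 with
              | some v => some (l ++ [v])
              | none => none
            else some l
          | _, _ => none)
      (some []) =
      (List.range (array.length - 1)).foldl
        (fun acc i => pvStep acc (array.getD i "", array.getD (i+1) "")) (some []) := by
    apply PySem.List.foldl_congr_mem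
    intro acc i hi
    have hlt : i < array.length - 1 := by simpa using hi
    have g1 : PySem.List.pyGet? array (i : Int) = some (array.getD i "") := by
      rw [PySem.List.pyGet?_natCast, List.getElem?_eq_getElem (by omega), List.getD_eq_getElem _ _ (by omega)]
    have g2 : PySem.List.pyGet? array ((i : Int) + 1) = some (array.getD (i+1) "") := by
      have : ((i : Int)) + 1 = ((i + 1 : Nat) : Int) := by push_cast; ring
      rw [this, PySem.List.pyGet?_natCast, List.getElem?_eq_getElem (by omega), List.getD_eq_getElem _ _ (by omega)]
    rw [g1, g2]
    cases acc <;> rfl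
  rw [hbody, ← List.foldl_map, range_pairs, foldl_pvStep_eq]
  cases hm : ((array.zip (array.drop 1)).filter (fun p => p.2 == "" || p.1 != "")).mapM
      (fun p => if p.2 = "" then some (0 : Int) else ecartNoteB p.1 p.2) <;>
    simp
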